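-- pv_equiv track=rewrite | github.com/sujayshandilaya/Coding-Practice | Code116.py | sortString
-- ===== SOURCE A (Python) =====
-- def sortString(s: str) -> str:
--     s=list(s)
--     letter=''
--     while s:
--         for char in sorted(set(s)):
--             s.remove(char)
--             letter+=char
--
--         for char in sorted(set(s), reverse=True):
--             s.remove(char)
--             letter+=char
--
--     return letter
-- ===== SOURCE B (Python) =====
-- def sortString(s: str) -> str:
--     # Count characters once, then emit rows: in round r the chars with count > r,
--     # ascending on even rounds and descending on odd rounds.
--     counts = {}
--     for c in s:
--         counts[c] = counts.get(c, 0) + 1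
--     chars = sorted(counts)
--     m = max(counts.values(), default=0)
--     out = []
--     for r in range(m):
--         row = [c for c in chars if counts[c] > r]
--         out.extend(row if r % 2 == 0 else reversed(row))
--     return ''.join(out)
-- ===== Notes on version B (the rewrite author's own statement) =====
-- stated objective: faster
-- what changed: Instead of repeatedly sorting the remaining multiset and removing one occurrence of each character with list.remove, B counts every character once, sorts the distinct characters, and emits round r as the characters with count > r (ascending on even rounds, reversed on odd rounds).
import Mathlib
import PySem

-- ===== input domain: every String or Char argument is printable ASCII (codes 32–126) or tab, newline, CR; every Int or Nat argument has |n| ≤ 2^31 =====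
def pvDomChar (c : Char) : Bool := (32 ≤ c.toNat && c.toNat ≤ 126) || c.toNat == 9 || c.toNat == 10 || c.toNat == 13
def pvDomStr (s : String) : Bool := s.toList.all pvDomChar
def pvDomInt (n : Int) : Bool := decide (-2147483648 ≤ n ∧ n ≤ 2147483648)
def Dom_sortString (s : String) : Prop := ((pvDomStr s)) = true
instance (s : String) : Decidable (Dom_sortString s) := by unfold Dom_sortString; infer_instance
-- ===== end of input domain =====

-- B replaces A's quadratic remove-one-of-each loop by a single counting pass plus up/down sweeps over the distinct characters (same return value; A mutates only its local copy of the input).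


-- ===== PORT A =====
-- one 'for char in order: s.remove(char); letter += char' pass, threading the state (s, letter)
def sortStringPass (st : List Char × List Char) (order : List Char) : List Char × List Char :=
  order.foldl (fun p char => ((PySem.List.remove? p.1 char).getD p.1, p.2 ++ [char])) st

-- the 'while s:' loop; fuel bounds the number of iterations (each iteration on s ≠ [] removes
-- at least one character, so |s| + 1 units always suffice — established in the proofs below)
def sortStringLoop : Nat → List Char → List Char → List Char
  | 0, _, letter => letter
  | fuel+1, s, letter =>
    if s = [] then letter
    else
      let p1 := sortStringPass (s, letter) (PySem.List.sorted (PySem.Set.ofList s) (fun x => x))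
      let p2 := sortStringPass p1 (PySem.List.sorted (PySem.Set.ofList p1.1) (fun x => x) true)
      sortStringLoop fuel p2.1 p2.2

def sortString (s : String) : String :=
  String.mk (sortStringLoop (s.toList.length + 1) s.toList [])

-- ===== PORT B =====
def sortString_alt (s : String) : String :=
  let counts : PySem.Dict Char Int :=
    s.toList.foldl (fun d c => d.insert c (d.getD c 0 + 1)) PySem.Dict.empty
  let chars := PySem.List.sorted counts.keys (fun x => x)
  let m : Int := PySem.List.maxD counts.values (fun v => v) 0
  let out := (PySem.List.pyRange 0 m 1).foldl (fun out r =>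
      let row := chars.filter (fun c => decide (counts.getD c 0 > r))
      out ++ (if PySem.Int.mod r 2 = 0 then row else row.reverse)) ([] : List Char)
  String.mk out

-- ===== PRECONDITION & SPEC =====
def Spec_sortString (s : String) (out : String) : Prop := out = sortString_alt s
instance (s : String) (out : String) : Decidable (Spec_sortString s out) := by unfold Spec_sortString; infer_instance

-- ===== CLAIM (what is proved, stated in full; the proofs are below) =====
def Claim_equal_sortString : Prop := ∀ (s : String), Dom_sortString s → Spec_sortString s (sortString s)

-- ===== LEMMAS AND PROOFS =====

-- round r of the emission: the distinct characters whose count exceeds r, in increasing order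
def pvRow (chars : List Char) (cnt : Char → Nat) (r : Nat) : List Char :=
  chars.filter (fun c => decide (r < cnt c))

-- round r as emitted: ascending on even rounds, descending on odd rounds
def pvRowB (chars : List Char) (cnt : Char → Nat) (r : Nat) : List Char :=
  if r % 2 = 0 then pvRow chars cnt r else (pvRow chars cnt r).reverse

-- all rounds from r to M-1, concatenated
def pvRows (chars : List Char) (cnt : Char → Nat) (M r : Nat) : List Char :=
  ((List.range (M - r)).map (fun i => pvRowB chars cnt (r + i))).flatten

lemma pvRemoveGetD (t : List Char) (c : Char) :
    (PySem.List.remove? t c).getD t = t.erase c := by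
  by_cases h : c ∈ t
  · rw [PySem.List.remove?_eq_some_erase t c h]; rfl
  · rw [(PySem.List.remove?_eq_none_iff t c).mpr h, List.erase_of_not_mem h]; rfl

lemma pass_eq : ∀ (d l acc : List Char),
    sortStringPass (l, acc) d = (d.foldl (fun t c => t.erase c) l, acc ++ d)
  | [], l, acc => by simp [sortStringPass]
  | c :: d, l, acc => by
    have h := pass_eq d (l.erase c) (acc ++ [c])
    simp only [sortStringPass, List.foldl_cons] at h ⊢
    rw [show ((PySem.List.remove? l c).getD l, acc ++ [c]) = (l.erase c, acc ++ [c]) by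
          rw [pvRemoveGetD], h]
    simp

lemma count_foldl_erase : ∀ (d : List Char), d.Nodup → ∀ (l : List Char) (c : Char),
    (d.foldl (fun t c => t.erase c) l).count c = l.count c - (if c ∈ d then 1 else 0)
  | [], _, l, c => by simp
  | b :: d, h, l, c => by
    simp only [List.nodup_cons] at h
    rw [List.foldl_cons, count_foldl_erase d h.2, List.count_erase]
    by_cases hc : c = b
    · subst hc
      simp [h.1]
    · simp [hc, Ne.symm hc, beq_iff_eq]

lemma row_asc (chars : List Char) (cnt : Char → Nat) (r : Nat)
    (hp : chars.Pairwise (· < ·)) (hmem : ∀ c, c ∈ chars ↔ 0 < cnt c)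
    (l : List Char) (hl : ∀ c, l.count c = cnt c - r) :
    PySem.List.sorted (PySem.Set.ofList l) (fun x => x) = pvRow chars cnt r := by
  rw [pvRow]
  apply PySem.List.sorted_eq_of_perm_of_pairwise_lt
  · rw [List.perm_ext_iff_of_nodup (List.Nodup.filter _ (hp.imp ne_of_lt))
        (PySem.Set.nodup_ofList l)]
    intro a
    rw [List.mem_filter, PySem.Set.mem_ofList, hmem a, ← List.count_pos_iff, hl a]
    simp only [decide_eq_true_eq]
    omega
  · exact List.Pairwise.sublist List.filter_sublist hp

lemma row_desc (chars : List Char) (cnt : Char → Nat) (r : Nat)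
    (hp : chars.Pairwise (· < ·)) (hmem : ∀ c, c ∈ chars ↔ 0 < cnt c)
    (l : List Char) (hl : ∀ c, l.count c = cnt c - r) :
    PySem.List.sorted (PySem.Set.ofList l) (fun x => x) true = (pvRow chars cnt r).reverse := by
  rw [pvRow]
  apply PySem.List.sorted_rev_eq_of_perm_of_pairwise_gt
  · refine (List.reverse_perm _).trans ?_
    rw [List.perm_ext_iff_of_nodup (List.Nodup.filter _ (hp.imp ne_of_lt))
        (PySem.Set.nodup_ofList l)]
    intro a
    rw [List.mem_filter, PySem.Set.mem_ofList, hmem a, ← List.count_pos_iff, hl a]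
    simp only [decide_eq_true_eq]
    omega
  · rw [List.pairwise_reverse]
    exact List.Pairwise.sublist List.filter_sublist hp

lemma pvRow_nodup (chars : List Char) (cnt : Char → Nat) (r : Nat)
    (hp : chars.Pairwise (· < ·)) : (pvRow chars cnt r).Nodup := by
  rw [pvRow]; exact List.Nodup.filter _ (hp.imp ne_of_lt)

lemma pvRow_eq_nil (chars : List Char) (cnt : Char → Nat) (r : Nat)
    (h : ∀ c, cnt c ≤ r) : pvRow chars cnt r = [] := by
  rw [pvRow, List.filter_eq_nil_iff]
  intro c _
  simpa using Nat.not_lt.mpr (h c)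

lemma pvRows_of_le (chars : List Char) (cnt : Char → Nat) (M r : Nat) (h : M ≤ r) :
    pvRows chars cnt M r = [] := by
  simp [pvRows, Nat.sub_eq_zero_of_le h]

lemma pvRows_succ (chars : List Char) (cnt : Char → Nat) (M r : Nat) (h : r < M) :
    pvRows chars cnt M r = pvRowB chars cnt r ++ pvRows chars cnt M (r + 1) := by
  have hM : M - r = (M - (r + 1)) + 1 := by omega
  rw [pvRows, hM, List.range_succ_eq_map]
  simp only [List.map_cons, List.map_map, List.flatten_cons, Nat.add_zero]
  rw [pvRows]
  congr 1
  congr 1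
  apply List.map_congr_left
  intro i _
  simp only [Function.comp]
  congr 1
  omega

lemma loop_eq (chars : List Char) (cnt : Char → Nat) (M : Nat)
    (hp : chars.Pairwise (· < ·)) (hmem : ∀ c, c ∈ chars ↔ 0 < cnt c)
    (hM : ∀ c, cnt c ≤ M) :
    ∀ (fuel q : Nat) (l acc : List Char), (∀ c, l.count c = cnt c - 2 * q) →
      M ≤ 2 * q + 2 * fuel →
      sortStringLoop fuel l acc = acc ++ pvRows chars cnt M (2 * q)
  | 0, q, l, acc => by
    intro _ hfuel
    rw [pvRows_of_le chars cnt M (2 * q) (by omega)]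
    simp [sortStringLoop]
  | fuel+1, q, l, acc => by
    intro hl hfuel
    by_cases hnil : l = []
    · subst hnil
      have hcnt : ∀ c, cnt c ≤ 2 * q := by
        intro c; have := hl c; simp at this; omega
      have hrows : pvRows chars cnt M (2 * q) = [] := by
        rw [pvRows, List.flatten_eq_nil_iff]
        intro xs hxs
        rw [List.mem_map] at hxs
        obtain ⟨i, -, rfl⟩ := hxs
        have h0 : pvRow chars cnt (2 * q + i) = [] :=
          pvRow_eq_nil _ _ _ (fun c => le_trans (hcnt c) (by omega))
        rw [pvRowB, h0]
        split <;> simp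
      simp [sortStringLoop, hrows]
    · -- one iteration of the while body: the ascending pass, then the descending pass
      have hd1 := row_asc chars cnt (2 * q) hp hmem l hl
      have hl1 : ∀ c, ((pvRow chars cnt (2 * q)).foldl (fun t c => t.erase c) l).count c
          = cnt c - (2 * q + 1) := by
        intro c
        rw [count_foldl_erase _ (pvRow_nodup chars cnt _ hp) l c, hl c]
        by_cases hc : c ∈ pvRow chars cnt (2 * q)
        · rw [if_pos hc]
          rw [pvRow, List.mem_filter] at hc
          have := of_decide_eq_true hc.2
          omega
        · rw [if_neg hc]
          have : ¬ (2 * q < cnt c) := by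
            intro hlt
            exact hc (by
              rw [pvRow, List.mem_filter]
              exact ⟨(hmem c).mpr (by omega), decide_eq_true hlt⟩)
          omega
      have hd2 := row_desc chars cnt (2 * q + 1) hp hmem
        ((pvRow chars cnt (2 * q)).foldl (fun t c => t.erase c) l) hl1
      have hl2 : ∀ c, ((pvRow chars cnt (2 * q + 1)).reverse.foldl (fun t c => t.erase c)
          ((pvRow chars cnt (2 * q)).foldl (fun t c => t.erase c) l)).count c
          = cnt c - 2 * (q + 1) := by
        intro c
        rw [count_foldl_erase _ (by
              rw [List.nodup_reverse]; exact pvRow_nodup chars cnt _ hp) _ c, hl1 c]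
        by_cases hc : c ∈ pvRow chars cnt (2 * q + 1)
        · rw [if_pos (List.mem_reverse.mpr hc)]
          rw [pvRow, List.mem_filter] at hc
          have := of_decide_eq_true hc.2
          omega
        · rw [if_neg (fun h => hc (List.mem_reverse.mp h))]
          have : ¬ (2 * q + 1 < cnt c) := by
            intro hlt
            exact hc (by
              rw [pvRow, List.mem_filter]
              exact ⟨(hmem c).mpr (by omega), decide_eq_true hlt⟩)
          omega
      have h2q : 2 * q < M := by
        obtain ⟨c, hc⟩ := List.exists_mem_of_ne_nil l hnil
        have h1 : 0 < l.count c := List.count_pos_iff.mpr hc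
        have h2 := hl c
        have h3 := hM c
        omega
      rw [sortStringLoop]
      simp only [if_neg hnil, hd1, pass_eq, hd2]
      rw [loop_eq chars cnt M hp hmem hM fuel (q + 1) _ _ hl2 (by omega)]
      have hB1 : pvRowB chars cnt (2 * q) = pvRow chars cnt (2 * q) := by
        rw [pvRowB, if_pos (by omega)]
      rw [pvRows_succ chars cnt M (2 * q) h2q, hB1]
      by_cases hM1 : 2 * q + 1 < M
      · rw [pvRows_succ chars cnt M (2 * q + 1) hM1]
        have hB2 : pvRowB chars cnt (2 * q + 1) = (pvRow chars cnt (2 * q + 1)).reverse := by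
          rw [pvRowB, if_neg (by omega)]
        rw [hB2]
        have h22 : 2 * q + 1 + 1 = 2 * (q + 1) := by omega
        rw [h22]
        simp [List.append_assoc]
      · have hrow : pvRow chars cnt (2 * q + 1) = [] :=
          pvRow_eq_nil _ _ _ (fun c => by have := hM c; omega)
        rw [pvRows_of_le chars cnt M (2 * q + 1) (by omega),
            pvRows_of_le chars cnt M (2 * (q + 1)) (by omega), hrow]
        simp

-- ===== VERDICT (by name: the statement is the Claim_ definition above) =====
theorem sortString_spec : Claim_equal_sortString := by
  intro s _
  show sortString s = sortString_alt s
  simp only [sortString, sortString_alt]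
  set t := s.toList with ht
  set counts : PySem.Dict Char Int :=
    t.foldl (fun d c => d.insert c (d.getD c 0 + 1)) PySem.Dict.empty with hcounts
  set cnt : Char → Nat := fun c => t.count c with hcnt
  have hkeys : counts.keys = PySem.Set.ofList t := by
    rw [hcounts, PySem.Dict.keys_foldl_insert t (fun d c => d.getD c 0 + 1) PySem.Dict.empty]
    simp [PySem.Dict.keys_empty, PySem.Set.update, PySem.Set.ofList_eq_foldl]
  have hgetD : ∀ c, counts.getD c 0 = (cnt c : Int) := by
    intro c
    rw [hcounts, PySem.Dict.getD_foldl_insert_add_one t PySem.Dict.empty c]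
    simp [PySem.Dict.getD_empty, hcnt]
  set chars := PySem.List.sorted counts.keys (fun x => x) with hchars
  have hp : chars.Pairwise (· < ·) := by
    rw [hchars, hkeys]; exact PySem.List.sorted_ofList_pairwise_lt t
  have hmem : ∀ c, c ∈ chars ↔ 0 < cnt c := by
    intro c
    rw [hchars, hkeys, PySem.List.mem_sorted, PySem.Set.mem_ofList, hcnt, ← List.count_pos_iff]
  set m : Int := PySem.List.maxD counts.values (fun v => v) 0 with hm
  have hvals : counts.values = counts.keys.map (fun k => counts.getD k 0) :=
    PySem.Dict.values_eq_map_keys counts (by rw [hkeys]; exact PySem.Set.nodup_ofList t) 0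
  have hM : ∀ c, cnt c ≤ m.toNat := by
    intro c
    by_cases hc : c ∈ t
    · have hv : (cnt c : Int) ∈ counts.values := by
        rw [hvals, List.mem_map]
        exact ⟨c, by rw [hkeys, PySem.Set.mem_ofList]; exact hc, hgetD c⟩
      have hne : counts.values ≠ [] := fun h => by simp [h] at hv
      rcases h : PySem.List.max? counts.values (fun v => v) with _ | mv
      · exact absurd ((PySem.List.max?_eq_none_iff _ _).mp h) hne
      · have hle := PySem.List.max?_isMax h _ hv
        have hmv : m = mv := by rw [hm, PySem.List.maxD, h]; rfl
        simp only at hle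
        omega
    · have : cnt c = 0 := by rw [hcnt]; exact List.count_eq_zero_of_not_mem hc
      omega
  have hlen : m.toNat ≤ t.length ∧ 0 ≤ m := by
    rcases h : PySem.List.max? counts.values (fun v => v) with _ | mv
    · have : m = 0 := by rw [hm, PySem.List.maxD, h]; rfl
      omega
    · have hv : mv ∈ counts.values := PySem.List.max?_mem h
      rw [hvals, List.mem_map] at hv
      obtain ⟨k, -, rfl⟩ := hv
      have hmk : m = counts.getD k 0 := by rw [hm, PySem.List.maxD, h]; rfl
      rw [hgetD k] at hmk
      have h1 : cnt k ≤ t.length := by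
        simp only [hcnt]
        exact List.count_le_length
      omega
  -- the A side equals the rows
  have hA : sortStringLoop (t.length + 1) t [] = pvRows chars cnt m.toNat 0 := by
    have := loop_eq chars cnt m.toNat hp hmem hM (t.length + 1) 0 t []
      (by intro c; simp [hcnt]) (by omega)
    simpa using this
  -- the B side equals the rows
  have hB : (PySem.List.pyRange 0 m 1).foldl (fun out r =>
      out ++ (if PySem.Int.mod r 2 = 0 then chars.filter (fun c => decide (counts.getD c 0 > r))
              else (chars.filter (fun c => decide (counts.getD c 0 > r))).reverse))
      ([] : List Char) = pvRows chars cnt m.toNat 0 := by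
    rw [PySem.List.pyRange_zero m]
    simp only [List.foldl_map]
    have hfunext : (fun (out : List Char) (i : Nat) =>
        out ++ (if PySem.Int.mod (i : Int) 2 = 0
                then chars.filter (fun c => decide (counts.getD c 0 > (i : Int)))
                else (chars.filter (fun c => decide (counts.getD c 0 > (i : Int)))).reverse))
        = (fun out i => out ++ pvRowB chars cnt i) := by
      funext out i
      have hrow : chars.filter (fun c => decide (counts.getD c 0 > (i : Int)))
          = pvRow chars cnt i := by
        rw [pvRow]
        congr 1
        funext c
        rw [hgetD c]
        simp [gt_iff_lt, Nat.cast_lt]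
      have hmod : PySem.Int.mod (i : Int) 2 = ((i % 2 : Nat) : Int) := by
        exact_mod_cast PySem.Int.mod_natCast i 2
      rw [hrow, pvRowB, hmod]
      by_cases hpar : i % 2 = 0
      · rw [if_pos (by exact_mod_cast hpar), if_pos hpar]
      · rw [if_neg (by exact_mod_cast hpar), if_neg hpar]
    rw [hfunext,
        PySem.List.foldl_append_eq_flatMap (pvRowB chars cnt) (List.range m.toNat) []]
    simp [pvRows, List.flatMap_def]
  rw [hA, hB]
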